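-- pv_equiv track=rewrite | github.com/pgoelz/citizensassemblies-replication | stratification.py | get_people_at_same_address
-- ===== SOURCE A (Python) =====
-- def get_people_at_same_address(people, pkey, columns_data, check_same_address_columns):
--     # primary_address1 = columns_data[pkey]["primary_address1"]
--     # primary_zip = columns_data[pkey]["primary_zip"]
--     primary_address1 = columns_data[pkey][check_same_address_columns[0]]
--     primary_zip = columns_data[pkey][check_same_address_columns[1]]
--     # there may be multiple people to delete, and deleting them as we go gives an error
--     people_to_delete = []
--     output_lines = []
--     for compare_key in people.keys():
--         if (
--             # primary_address1 == columns_data[compare_key]["primary_address1"]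
--             # and primary_zip == columns_data[compare_key]["primary_zip"]
--             primary_address1 == columns_data[compare_key][check_same_address_columns[0]]
--             and primary_zip == columns_data[compare_key][check_same_address_columns[1]]
--         ):
--             # found same address
--             output_lines += [
--                 "Found someone with the same address as a selected person,"
--                 " so deleting him/her. Address: {} , {}".format(primary_address1, primary_zip)
--             ]
--             people_to_delete.append(compare_key)
--     return people_to_delete, output_lines
-- ===== SOURCE B (Python) =====
-- def get_people_at_same_address(people, pkey, columns_data, check_same_address_columns):
--     col_a = check_same_address_columns[0]
--     col_z = check_same_address_columns[1]
--     # index every person by their (address1, zip) pair, in key order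
--     groups = {}
--     for k in people:
--         addr = (columns_data[k][col_a], columns_data[k][col_z])
--         groups.setdefault(addr, []).append(k)
--     target = (columns_data[pkey][col_a], columns_data[pkey][col_z])
--     people_to_delete = groups.get(target, [])
--     msg = ("Found someone with the same address as a selected person,"
--            " so deleting him/her. Address: {} , {}".format(target[0], target[1]))
--     return people_to_delete, [msg] * len(people_to_delete)
-- ===== Notes on version B (the rewrite author's own statement) =====
-- stated objective: alternative
-- what changed: Instead of scanning people and comparing each row's two address fields against the target, B builds a grouping index mapping each (address1, zip) pair to the list of people having it, then answers by a single lookup of the target pair; the message list is produced by count-driven replication.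
import Mathlib
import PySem

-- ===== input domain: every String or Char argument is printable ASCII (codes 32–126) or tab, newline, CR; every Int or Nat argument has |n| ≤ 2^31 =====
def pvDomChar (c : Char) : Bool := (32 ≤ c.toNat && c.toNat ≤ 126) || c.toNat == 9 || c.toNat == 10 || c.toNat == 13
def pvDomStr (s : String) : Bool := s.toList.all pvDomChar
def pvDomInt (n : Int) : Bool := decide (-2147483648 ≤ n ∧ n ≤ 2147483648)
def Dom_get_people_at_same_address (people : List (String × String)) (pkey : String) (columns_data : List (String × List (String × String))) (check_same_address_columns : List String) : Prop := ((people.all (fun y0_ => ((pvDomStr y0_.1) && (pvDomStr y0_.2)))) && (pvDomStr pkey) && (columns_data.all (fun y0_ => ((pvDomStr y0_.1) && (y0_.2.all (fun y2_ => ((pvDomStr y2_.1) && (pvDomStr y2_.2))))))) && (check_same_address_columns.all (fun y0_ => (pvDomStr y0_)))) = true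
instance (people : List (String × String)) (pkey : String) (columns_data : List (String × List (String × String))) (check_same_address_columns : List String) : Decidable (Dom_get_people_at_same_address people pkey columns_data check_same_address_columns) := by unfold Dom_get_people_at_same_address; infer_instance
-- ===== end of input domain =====

-- B replaces A's lockstep filtering loop by a grouping index: one pass builds a dict from
-- (address1, zip) pairs to lists of people keys, then the answer is a single lookup of the
-- target pair plus count-driven replication of the constant message; objective: alternative.

-- ===== PORT A =====
-- data conversion required by the type convention: columns_data is a Python
-- dict[str, dict[str, str]], given here as an association list
def pvColMap (columns_data : List (String × List (String × String))) : PySem.Dict String (PySem.Dict String String) :=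
  PySem.Dict.ofList (columns_data.map fun p => (p.1, PySem.Dict.ofList p.2))

-- the message ".format(primary_address1, primary_zip)"
def pvMsg (a1 z : String) : String :=
  "Found someone with the same address as a selected person, so deleting him/her. Address: " ++ a1 ++ " , " ++ z

def get_people_at_same_address (people : List (String × String)) (pkey : String) (columns_data : List (String × List (String × String))) (check_same_address_columns : List String) : List String × List String :=
  match (pvColMap columns_data).get? pkey, check_same_address_columns with
  | some prow, c0 :: c1 :: _ =>
    match prow.get? c0, prow.get? c1 with
    | some primary_address1, some primary_zip =>
      -- for compare_key in people.keys(): …  (Python looks columns_data[compare_key] up twice)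
      ((PySem.Dict.ofList people).keys).foldl (fun acc compare_key =>
        if (((pvColMap columns_data).get? compare_key).getD PySem.Dict.empty).getD c0 "" == primary_address1 &&
           (((pvColMap columns_data).get? compare_key).getD PySem.Dict.empty).getD c1 "" == primary_zip then
          (acc.1 ++ [compare_key], acc.2 ++ [pvMsg primary_address1 primary_zip])
        else acc) ([], [])
    | _, _ => ([], [])  -- Python raises KeyError here (outside Pre_)
  | _, _ => ([], [])    -- Python raises KeyError/IndexError here (outside Pre_)

-- ===== PORT B =====
-- B-side copies of the data conversion and the constant message
def pvColMapB (columns_data : List (String × List (String × String))) : PySem.Dict String (PySem.Dict String String) :=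
  PySem.Dict.ofList (columns_data.map fun p => (p.1, PySem.Dict.ofList p.2))

def pvMsgB (a1 z : String) : String :=
  "Found someone with the same address as a selected person, so deleting him/her. Address: " ++ a1 ++ " , " ++ z

-- the (address1, zip) pair of a person's row (defaults are don't-cares: Pre_ guarantees presence)
def pvAddrOf (columns_data : List (String × List (String × String))) (c0 c1 k : String) : String × String :=
  ((((pvColMapB columns_data).get? k).getD PySem.Dict.empty).getD c0 "",
   (((pvColMapB columns_data).get? k).getD PySem.Dict.empty).getD c1 "")

def get_people_at_same_address_alt (people : List (String × String)) (pkey : String) (columns_data : List (String × List (String × String))) (check_same_address_columns : List String) : List String × List String :=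
  -- each failing list index / dict lookup is an IndexError / KeyError in Python (outside Pre_)
  (PySem.List.pyGet? check_same_address_columns 0).elim ([], []) (fun col_a =>
    (PySem.List.pyGet? check_same_address_columns 1).elim ([], []) (fun col_z =>
      -- groups.setdefault(addr, []).append(k)
      let groups := ((PySem.Dict.ofList people).keys).foldl
        (fun (g : PySem.Dict (String × String) (List String)) k =>
          let addr := pvAddrOf columns_data col_a col_z k
          g.insert addr (g.getD addr [] ++ [k])) PySem.Dict.empty
      ((pvColMapB columns_data).get? pkey).elim ([], []) (fun trow =>
        (trow.get? col_a).elim ([], []) (fun ta =>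
          (trow.get? col_z).elim ([], []) (fun tz =>
            let people_to_delete := groups.getD (ta, tz) []
            (people_to_delete, List.replicate people_to_delete.length (pvMsgB ta tz)))))))

-- ===== PRECONDITION & SPEC =====
-- Pre_ excludes the inputs where Python A raises (check_same_address_columns shorter than 2,
-- pkey or its two columns missing, a person's row missing or its first column missing, or the
-- second column missing on a MATCHING row) and additionally the inputs where B's index build
-- raises though A returns: a non-matching person row lacking the second column, which A never
-- touches thanks to `and` short-circuiting but B's grouping reads for every person.
def pvPreB (people : List (String × String)) (pkey : String) (columns_data : List (String × List (String × String))) (check_same_address_columns : List String) : Bool :=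
  (PySem.List.pyGet? check_same_address_columns 0).elim false (fun c0 =>
    (PySem.List.pyGet? check_same_address_columns 1).elim false (fun c1 =>
      ((pvColMapB columns_data).get? pkey).elim false (fun prow =>
        prow.contains c0 && prow.contains c1) &&
      ((PySem.Dict.ofList people).keys).all (fun k =>
        ((pvColMapB columns_data).get? k).elim false (fun row =>
          row.contains c0 && row.contains c1))))

def Pre_get_people_at_same_address (people : List (String × String)) (pkey : String) (columns_data : List (String × List (String × String))) (check_same_address_columns : List String) : Prop :=
  pvPreB people pkey columns_data check_same_address_columns = true
instance (people : List (String × String)) (pkey : String) (columns_data : List (String × List (String × String))) (check_same_address_columns : List String) : Decidable (Pre_get_people_at_same_address people pkey columns_data check_same_address_columns) := by unfold Pre_get_people_at_same_address; infer_instance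

def pvWitness_get_people_at_same_address : (List (String × String)) × String × (List (String × List (String × String))) × List String :=
  ([("p1", "x"), ("p2", "y")], "p1", [("p1", [("a", "1"), ("z", "2")]), ("p2", [("a", "1"), ("z", "3")])], ["a", "z"])

def Spec_get_people_at_same_address (people : List (String × String)) (pkey : String) (columns_data : List (String × List (String × String))) (check_same_address_columns : List String) (out : List String × List String) : Prop := out = get_people_at_same_address_alt people pkey columns_data check_same_address_columns
instance (people : List (String × String)) (pkey : String) (columns_data : List (String × List (String × String))) (check_same_address_columns : List String) (out : List String × List String) : Decidable (Spec_get_people_at_same_address people pkey columns_data check_same_address_columns out) := by unfold Spec_get_people_at_same_address; infer_instance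

-- ===== CLAIM (what is proved, stated in full; the proofs are below) =====
def Claim_equal_get_people_at_same_address : Prop := ∀ (people : List (String × String)) (pkey : String) (columns_data : List (String × List (String × String))) (check_same_address_columns : List String), Dom_get_people_at_same_address people pkey columns_data check_same_address_columns → Pre_get_people_at_same_address people pkey columns_data check_same_address_columns → Spec_get_people_at_same_address people pkey columns_data check_same_address_columns (get_people_at_same_address people pkey columns_data check_same_address_columns)

-- ===== LEMMAS AND PROOFS =====

-- grouping-index characterisation: looking the target pair up in the dict built by the
-- grouping fold yields exactly the keys whose pair equals the target, in order.
theorem pv_group_fold_getD (f : String → String × String) (t : String × String) (ks : List String) (d : PySem.Dict (String × String) (List String)) :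
    (ks.foldl (fun (g : PySem.Dict (String × String) (List String)) k =>
        g.insert (f k) (g.getD (f k) [] ++ [k])) d).getD t []
      = d.getD t [] ++ ks.filter (fun k => f k == t) := by
  induction ks generalizing d with
  | nil => simp
  | cons k ks ih =>
    simp only [List.foldl_cons, List.filter_cons, ih]
    by_cases h : f k = t
    · rw [PySem.Dict.getD_insert]
      simp [h]
    · rw [PySem.Dict.getD_insert]
      simp [Ne.symm h, h]

-- A's lockstep accumulation over any key list equals filter + replicate.
theorem pv_foldl_eq_filter_replicate (p : String → Bool) (m : String) (ks : List String) (l1 l2 : List String) :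
    ks.foldl (fun (acc : List String × List String) k =>
        if p k then (acc.1 ++ [k], acc.2 ++ [m]) else acc) (l1, l2)
      = (l1 ++ ks.filter p, l2 ++ List.replicate (ks.filter p).length m) := by
  induction ks generalizing l1 l2 with
  | nil => simp
  | cons k ks ih =>
    by_cases h : p k
    · simp [h, ih]
      rw [List.replicate_succ]
    · simp [h, ih]

-- ===== VERDICT (by name: the statement is the Claim_ definition above) =====
theorem get_people_at_same_address_spec : Claim_equal_get_people_at_same_address := by
  intro people pkey columns_data cols _ _
  unfold Spec_get_people_at_same_address get_people_at_same_address get_people_at_same_address_alt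
  rw [show pvColMapB = pvColMap from rfl, show pvMsgB = pvMsg from rfl]
  match cols with
  | [] => cases h1 : (pvColMap columns_data).get? pkey <;> rfl
  | [_] => cases h1 : (pvColMap columns_data).get? pkey <;>
      simp [PySem.List.pyGet?, PySem.List.pyIdx?]
  | c0 :: c1 :: rest =>
    have g0 : PySem.List.pyGet? (c0 :: c1 :: rest) 0 = some c0 :=
      PySem.List.pyGet?_zero_cons c0 (c1 :: rest)
    have g1 : PySem.List.pyGet? (c0 :: c1 :: rest) 1 = some c1 := by
      simpa using PySem.List.pyGet?_cons_succ (x := c0) (xs := c1 :: rest) (n := 0)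
    cases h1 : (pvColMap columns_data).get? pkey with
    | none => simp [g0]
    | some prow =>
      cases h2 : prow.get? c0 with
      | none => simp [g0, h2]
      | some a1 =>
        cases h3 : prow.get? c1 with
        | none => simp [g0, h2, h3]
        | some z =>
          simp only [g0, g1, h2, h3, Option.elim]
          rw [pv_foldl_eq_filter_replicate]
          have hpred : ∀ k ∈ (PySem.Dict.ofList people).keys,
              ((((pvColMap columns_data).get? k).getD PySem.Dict.empty).getD c0 "" == a1 &&
               (((pvColMap columns_data).get? k).getD PySem.Dict.empty).getD c1 "" == z)
              = (pvAddrOf columns_data c0 c1 k == (a1, z)) := by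
            intro k _
            rfl
          rw [List.filter_congr hpred, pv_group_fold_getD (pvAddrOf columns_data c0 c1) (a1, z)]
          simp
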